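-- pv_equiv track=rewrite | github.com/Alsairy/Masark_Engine | src/services/enhanced_assessment_validation.py | _analyze_sequential_patterns
-- ===== SOURCE A (Python) =====
-- from typing import Dict, List, Tuple, Optional, NamedTuple
--
-- def _analyze_sequential_patterns(response_sequence: List[str]) -> Dict[str, int]:
--     """Analyze sequential response patterns"""
--     patterns = {
--         'consecutive_A': 0,
--         'consecutive_B': 0,
--         'alternating_AB': 0,
--         'alternating_BA': 0,
--         'max_consecutive_same': 0,
--         'total_runs': 0
--     }
--
--     if not response_sequence:
--         return patterns
--
--     # Count consecutive responses
--     current_consecutive = 1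
--     max_consecutive = 1
--     runs = 1
--
--     for i in range(1, len(response_sequence)):
--         if response_sequence[i] == response_sequence[i-1]:
--             current_consecutive += 1
--             max_consecutive = max(max_consecutive, current_consecutive)
--         else:
--             current_consecutive = 1
--             runs += 1
--
--     patterns['max_consecutive_same'] = max_consecutive
--     patterns['total_runs'] = runs
--
--     # Count specific patterns
--     for i in range(len(response_sequence) - 1):
--         if response_sequence[i] == 'A' and response_sequence[i+1] == 'A':
--             patterns['consecutive_A'] += 1
--         elif response_sequence[i] == 'B' and response_sequence[i+1] == 'B':
--             patterns['consecutive_B'] += 1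
--         elif response_sequence[i] == 'A' and response_sequence[i+1] == 'B':
--             patterns['alternating_AB'] += 1
--         elif response_sequence[i] == 'B' and response_sequence[i+1] == 'A':
--             patterns['alternating_BA'] += 1
--
--     return patterns
-- ===== SOURCE B (Python) =====
-- from typing import Dict, List
--
-- def _analyze_sequential_patterns(response_sequence: List[str]) -> Dict[str, int]:
--     """Analyze sequential response patterns via a run-length encoding of the sequence."""
--     patterns = {
--         'consecutive_A': 0,
--         'consecutive_B': 0,
--         'alternating_AB': 0,
--         'alternating_BA': 0,
--         'max_consecutive_same': 0,
--         'total_runs': 0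
--     }
--     if not response_sequence:
--         return patterns
--     # run-length encoding: list of (value, length) of the maximal runs
--     runs = []
--     for x in response_sequence:
--         if runs and runs[-1][0] == x:
--             runs[-1] = (x, runs[-1][1] + 1)
--         else:
--             runs.append((x, 1))
--     # every statistic is read off the runs; no adjacent-element scan is needed:
--     # a run of value t and length n contributes n-1 (t,t) pairs, and a (t,u)
--     # pair with t != u occurs exactly at a boundary between a t-run and a u-run.
--     patterns['consecutive_A'] = sum(n - 1 for v, n in runs if v == 'A')
--     patterns['consecutive_B'] = sum(n - 1 for v, n in runs if v == 'B')
--     boundaries = [(r[0], s[0]) for r, s in zip(runs, runs[1:])]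
--     patterns['alternating_AB'] = boundaries.count(('A', 'B'))
--     patterns['alternating_BA'] = boundaries.count(('B', 'A'))
--     patterns['max_consecutive_same'] = max(n for _, n in runs)
--     patterns['total_runs'] = len(runs)
--     return patterns
-- ===== Notes on version B (the rewrite author's own statement) =====
-- stated objective: alternative
-- what changed: B first builds a run-length encoding of the sequence and derives every statistic from the runs alone (within-run pairs as sum of length-1, alternations as counts over run boundaries, max/total from run lengths), eliminating A's per-index adjacent-pair state machine and four-way elif scan.
import Mathlib
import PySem

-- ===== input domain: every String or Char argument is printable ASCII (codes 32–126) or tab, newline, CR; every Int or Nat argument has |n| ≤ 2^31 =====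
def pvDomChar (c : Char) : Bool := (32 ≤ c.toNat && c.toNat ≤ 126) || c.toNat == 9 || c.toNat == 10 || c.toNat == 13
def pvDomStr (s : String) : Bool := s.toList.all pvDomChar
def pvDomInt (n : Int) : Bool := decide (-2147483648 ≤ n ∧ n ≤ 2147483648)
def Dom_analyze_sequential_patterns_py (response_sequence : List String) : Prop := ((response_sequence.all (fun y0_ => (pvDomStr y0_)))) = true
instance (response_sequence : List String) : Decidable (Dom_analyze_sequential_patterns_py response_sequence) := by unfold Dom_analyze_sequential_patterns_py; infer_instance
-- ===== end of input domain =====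

-- B replaces A's per-index adjacent-pair state machine by a run-length encoding of the
-- sequence from which all six statistics are derived (alternative; same O(n) cost).


-- ===== PORT A =====
-- Literal port of A: dict of six keys; first loop over range(1, len) maintaining
-- (current_consecutive, max_consecutive, runs); second loop over range(len-1) with the
-- four-way elif chain bumping dict entries.  All indices rs[i] are in range here, so
-- pyGetD with a dummy default is exact (no IndexError is reachable).
def analyze_sequential_patterns_py (response_sequence : List String) : List (String × Int) :=
  let patterns : PySem.Dict String Int :=
    ⟨[("consecutive_A", 0), ("consecutive_B", 0), ("alternating_AB", 0),
      ("alternating_BA", 0), ("max_consecutive_same", 0), ("total_runs", 0)]⟩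
  if response_sequence = [] then patterns.items
  else
    let s := (PySem.List.pyRange 1 (response_sequence.length : Int) 1).foldl
      (fun (st : Int × Int × Int) i =>
        if PySem.List.pyGetD response_sequence i "" = PySem.List.pyGetD response_sequence (i - 1) "" then
          (st.1 + 1, max st.2.1 (st.1 + 1), st.2.2)
        else
          (1, st.2.1, st.2.2 + 1)) (1, 1, 1)
    let patterns := patterns.insert "max_consecutive_same" s.2.1
    let patterns := patterns.insert "total_runs" s.2.2
    let patterns := (PySem.List.pyRange 0 ((response_sequence.length : Int) - 1) 1).foldl
      (fun (d : PySem.Dict String Int) i =>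
        if PySem.List.pyGetD response_sequence i "" = "A" ∧ PySem.List.pyGetD response_sequence (i + 1) "" = "A" then
          d.modify "consecutive_A" 0 (· + 1)
        else if PySem.List.pyGetD response_sequence i "" = "B" ∧ PySem.List.pyGetD response_sequence (i + 1) "" = "B" then
          d.modify "consecutive_B" 0 (· + 1)
        else if PySem.List.pyGetD response_sequence i "" = "A" ∧ PySem.List.pyGetD response_sequence (i + 1) "" = "B" then
          d.modify "alternating_AB" 0 (· + 1)
        else if PySem.List.pyGetD response_sequence i "" = "B" ∧ PySem.List.pyGetD response_sequence (i + 1) "" = "A" then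
          d.modify "alternating_BA" 0 (· + 1)
        else d) patterns
    patterns.items

-- ===== PORT B =====
-- One step of Source B's run-length-encoding loop: extend the last run if its value
-- matches x (runs[-1] = (x, runs[-1][1]+1)), else append a fresh run (x, 1).
def pvStep (runs : List (String × Int)) (x : String) : List (String × Int) :=
  match runs.getLast? with
  | some last => if last.1 = x then runs.dropLast ++ [(x, last.2 + 1)] else runs ++ [(x, 1)]
  | none => runs ++ [(x, 1)]

-- Port of Source B: build the run-length encoding, then read every statistic off the runs:
-- consecutive_* as sums of (length-1) over same-valued runs, alternating_* as counts
-- over the run-boundary value pairs, max/total from the run lengths.  max(...) is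
-- PySem.List.max?; the `none` arm is unreachable here (runs is nonempty).
def analyze_sequential_patterns_py_alt (response_sequence : List String) : List (String × Int) :=
  if response_sequence = [] then
    [("consecutive_A", 0), ("consecutive_B", 0), ("alternating_AB", 0),
     ("alternating_BA", 0), ("max_consecutive_same", 0), ("total_runs", 0)]
  else
    let runs := response_sequence.foldl pvStep []
    let cA := ((runs.filter (fun p => p.1 == "A")).map (fun p => p.2 - 1)).sum
    let cB := ((runs.filter (fun p => p.1 == "B")).map (fun p => p.2 - 1)).sum
    let boundaries := (runs.zip (PySem.List.slice runs (some 1) none)).map (fun p => (p.1.1, p.2.1))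
    let mx : Int := match PySem.List.max? (runs.map (fun p => p.2)) id with
      | some m => m
      | none => 0
    [("consecutive_A", cA), ("consecutive_B", cB),
     ("alternating_AB", (PySem.List.count boundaries ("A", "B") : Int)),
     ("alternating_BA", (PySem.List.count boundaries ("B", "A") : Int)),
     ("max_consecutive_same", mx), ("total_runs", (runs.length : Int))]

-- ===== PRECONDITION & SPEC =====
def Spec_analyze_sequential_patterns_py (response_sequence : List String) (out : List (String × Int)) : Prop := out = analyze_sequential_patterns_py_alt response_sequence
instance (response_sequence : List String) (out : List (String × Int)) : Decidable (Spec_analyze_sequential_patterns_py response_sequence out) := by unfold Spec_analyze_sequential_patterns_py; infer_instance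

-- ===== CLAIM (what is proved, stated in full; the proofs are below) =====
def Claim_equal_analyze_sequential_patterns_py : Prop := ∀ (response_sequence : List String), Dom_analyze_sequential_patterns_py response_sequence → Spec_analyze_sequential_patterns_py response_sequence (analyze_sequential_patterns_py response_sequence)

-- ===== LEMMAS AND PROOFS =====

-- recursive characterisation of Source B's run-length-encoding loop
def pvRLEGo (c : String) (n : Int) : List String → List (String × Int)
  | [] => [(c, n)]
  | y :: ys => if y = c then pvRLEGo c (n + 1) ys else (c, n) :: pvRLEGo y 1 ys

theorem pvFoldl_pvStep (xs : List String) : ∀ (acc : List (String × Int)) (c : String) (n : Int),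
    xs.foldl pvStep (acc ++ [(c, n)]) = acc ++ pvRLEGo c n xs := by
  induction xs with
  | nil => intro acc c n; rfl
  | cons y ys ih =>
      intro acc c n
      rw [List.foldl_cons]
      by_cases h : y = c
      · subst h
        have hstep : pvStep (acc ++ [(y, n)]) y = acc ++ [(y, n + 1)] := by
          unfold pvStep
          rw [List.getLast?_concat]
          simp
        rw [hstep, ih acc y (n + 1)]
        simp [pvRLEGo]
      · have hstep : pvStep (acc ++ [(c, n)]) y = (acc ++ [(c, n)]) ++ [(y, 1)] := by
          unfold pvStep
          rw [List.getLast?_concat]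
          simp [Ne.symm h]
        rw [hstep, ih (acc ++ [(c, n)]) y 1]
        simp [pvRLEGo, h]

theorem pvRuns_eq (x : String) (xs : List String) :
    (x :: xs).foldl pvStep [] = pvRLEGo x 1 xs := by
  rw [List.foldl_cons]
  have h0 : pvStep [] x = [] ++ [(x, 1)] := rfl
  rw [h0]
  exact pvFoldl_pvStep xs [] x 1

-- every run list starts with a run of the seed value
theorem pvRLEGo_head (xs : List String) : ∀ (c : String) (n : Int),
    ∃ m t, pvRLEGo c n xs = (c, m) :: t := by
  induction xs with
  | nil => intro c n; exact ⟨n, [], rfl⟩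
  | cons y ys ih =>
      intro c n
      by_cases h : y = c
      · simpa [pvRLEGo, h] using ih c (n + 1)
      · exact ⟨n, pvRLEGo y 1 ys, by simp [pvRLEGo, h]⟩

-- the value B reads off max? (0 only for the empty list, which never occurs here)
def pvMx (l : List Int) : Int := match PySem.List.max? l id with | some m => m | none => 0

theorem pvMax?_cons : ∀ (l : List Int) (a : Int),
    PySem.List.max? (a :: l) id = some (List.foldl max a l) := by
  intro l a
  simpa using PySem.List.max?_id_cons a l

theorem pvMx_cons (l : List Int) (a : Int) : pvMx (a :: l) = l.foldl max a := by
  unfold pvMx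
  rw [pvMax?_cons]

theorem pvFoldl_max_pull (l : List Int) : ∀ (a c : Int),
    max c (l.foldl max a) = l.foldl max (max c a) := by
  induction l with
  | nil => intro a c; rfl
  | cons x xs ih => intro a c; simp only [List.foldl_cons]; rw [ih, max_assoc]

-- run lengths of the RLE (used to connect A's first loop with B's runs)
def pvRunGo (c : String) (n : Int) : List String → List Int
  | [] => [n]
  | y :: ys => if y = c then pvRunGo c (n + 1) ys else n :: pvRunGo y 1 ys

theorem pvRLEGo_snd (xs : List String) : ∀ (c : String) (n : Int),
    (pvRLEGo c n xs).map (fun p => p.2) = pvRunGo c n xs := by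
  induction xs with
  | nil => intro c n; rfl
  | cons y ys ih =>
      intro c n
      by_cases h : y = c <;> simp [pvRLEGo, pvRunGo, h, ih]

theorem pvRunGo_ne_nil (xs : List String) (c : String) (n : Int) : pvRunGo c n xs ≠ [] := by
  induction xs generalizing c n with
  | nil => simp [pvRunGo]
  | cons y ys ih => simp only [pvRunGo]; split_ifs <;> simp [ih]

theorem pvRunGo_max_ge (xs : List String) : ∀ (c : String) (n : Int),
    n ≤ pvMx (pvRunGo c n xs) := by
  induction xs with
  | nil => intro c n; simp [pvRunGo, pvMx_cons]
  | cons y ys ih =>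
      intro c n
      simp only [pvRunGo]
      split_ifs
      · exact le_trans (by omega) (ih c (n + 1))
      · rw [pvMx_cons]
        exact (PySem.List.le_foldl_max _ _).1

-- generic: an indexed fold over adjacent positions is the fold over zip(rs, rs.tail)
theorem pvPairFold {σ : Type} (g : σ → String → String → σ) :
    ∀ (rs : List String) (init : σ),
      (List.range (rs.length - 1)).foldl
          (fun s i => g s (rs.getD i "") (rs.getD (i + 1) "")) init
        = (rs.zip rs.tail).foldl (fun s p => g s p.1 p.2) init := by
  intro rs
  induction rs with
  | nil => intro init; rfl
  | cons x xs ih =>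
      intro init
      cases xs with
      | nil => rfl
      | cons y t =>
          have hr : List.range (y :: t).length = 0 :: (List.range t.length).map Nat.succ :=
            List.range_succ_eq_map
          simp only [List.length_cons, Nat.add_sub_cancel] at *
          rw [hr]
          simp only [List.foldl_cons, List.foldl_map, List.getD_cons_zero, List.getD_cons_succ,
            Nat.succ_eq_add_one, List.zip_cons_cons, List.tail_cons]
          simpa using ih (g init x y)

-- loop-1 range conversion: pyRange 1 n = map (1+1*·) (range (n-1))
theorem pvRange_one (n : Nat) (h : 1 ≤ n) :
    PySem.List.pyRange 1 (n : Int) 1 = (List.range (n - 1)).map (fun (k : Nat) => 1 + 1 * (k : Int)) := by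
  rw [PySem.List.pyRange_of_pos 1 (n : Int) (by omega)]
  rcases Nat.lt_or_ge 1 n with h1 | h1
  · have h2 : (1 : Int) < (n : Int) := by exact_mod_cast h1
    rw [if_pos h2]
    have h3 : (((n : Int) - 1 + 1 - 1) / 1).toNat = n - 1 := by omega
    rw [h3]
  · have hn : n = 1 := by omega
    subst hn; rfl

-- A's first loop as a fold over adjacent pairs
theorem pvLoop1Conv (rs : List String) (h : rs ≠ []) (init : Int × Int × Int) :
    (PySem.List.pyRange 1 (rs.length : Int) 1).foldl
      (fun (st : Int × Int × Int) i =>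
        if PySem.List.pyGetD rs i "" = PySem.List.pyGetD rs (i - 1) "" then
          (st.1 + 1, max st.2.1 (st.1 + 1), st.2.2)
        else
          (1, st.2.1, st.2.2 + 1)) init
    = (rs.zip rs.tail).foldl
      (fun (st : Int × Int × Int) p =>
        if p.2 = p.1 then (st.1 + 1, max st.2.1 (st.1 + 1), st.2.2)
        else (1, st.2.1, st.2.2 + 1)) init := by
  have hlen : 1 ≤ rs.length := by
    cases rs with | nil => exact absurd rfl h | cons a l => simp
  rw [pvRange_one rs.length hlen, List.foldl_map]
  have e1 : ∀ (k : Nat), (1 + 1 * (k : Int) - 1) = (k : Int) := by intro k; ring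
  have e2 : ∀ (k : Nat), (1 + 1 * (k : Int)) = ((k + 1 : Nat) : Int) := by intro k; push_cast; ring
  simp only [e1]
  simp only [e2, PySem.List.pyGetD_natCast]
  exact pvPairFold
    (fun (st : Int × Int × Int) prev cur =>
      if cur = prev then (st.1 + 1, max st.2.1 (st.1 + 1), st.2.2)
      else (1, st.2.1, st.2.2 + 1)) rs init

-- A's second loop as a fold over adjacent pairs
theorem pvLoop2Conv (rs : List String) (h : rs ≠ []) (init : PySem.Dict String Int) :
    (PySem.List.pyRange 0 ((rs.length : Int) - 1) 1).foldl
      (fun (d : PySem.Dict String Int) i =>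
        if PySem.List.pyGetD rs i "" = "A" ∧ PySem.List.pyGetD rs (i + 1) "" = "A" then
          d.modify "consecutive_A" 0 (· + 1)
        else if PySem.List.pyGetD rs i "" = "B" ∧ PySem.List.pyGetD rs (i + 1) "" = "B" then
          d.modify "consecutive_B" 0 (· + 1)
        else if PySem.List.pyGetD rs i "" = "A" ∧ PySem.List.pyGetD rs (i + 1) "" = "B" then
          d.modify "alternating_AB" 0 (· + 1)
        else if PySem.List.pyGetD rs i "" = "B" ∧ PySem.List.pyGetD rs (i + 1) "" = "A" then
          d.modify "alternating_BA" 0 (· + 1)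
        else d) init
    = (rs.zip rs.tail).foldl
      (fun (d : PySem.Dict String Int) p =>
        if p.1 = "A" ∧ p.2 = "A" then d.modify "consecutive_A" 0 (· + 1)
        else if p.1 = "B" ∧ p.2 = "B" then d.modify "consecutive_B" 0 (· + 1)
        else if p.1 = "A" ∧ p.2 = "B" then d.modify "alternating_AB" 0 (· + 1)
        else if p.1 = "B" ∧ p.2 = "A" then d.modify "alternating_BA" 0 (· + 1)
        else d) init := by
  have hlen : 1 ≤ rs.length := by
    cases rs with | nil => exact absurd rfl h | cons a l => simp
  have e0 : ((rs.length : Int) - 1) = ((rs.length - 1 : Nat) : Int) := by omega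
  rw [e0, PySem.List.pyRange_zero_natCast, List.foldl_map]
  have e2 : ∀ (k : Nat), ((k : Int) + 1) = ((k + 1 : Nat) : Int) := by intro k; push_cast; ring
  simp only [e2, PySem.List.pyGetD_natCast]
  exact pvPairFold
    (fun (d : PySem.Dict String Int) x y =>
      if x = "A" ∧ y = "A" then d.modify "consecutive_A" 0 (· + 1)
      else if x = "B" ∧ y = "B" then d.modify "consecutive_B" 0 (· + 1)
      else if x = "A" ∧ y = "B" then d.modify "alternating_AB" 0 (· + 1)
      else if x = "B" ∧ y = "A" then d.modify "alternating_BA" 0 (· + 1)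
      else d) rs init

-- A's second loop, from the six-key dict: the items are the base values plus pair counts
theorem pvLoop2_items (ps : List (String × String)) :
    ∀ (a b ab ba m r : Int),
    (ps.foldl
      (fun (d : PySem.Dict String Int) p =>
        if p.1 = "A" ∧ p.2 = "A" then d.modify "consecutive_A" 0 (· + 1)
        else if p.1 = "B" ∧ p.2 = "B" then d.modify "consecutive_B" 0 (· + 1)
        else if p.1 = "A" ∧ p.2 = "B" then d.modify "alternating_AB" 0 (· + 1)
        else if p.1 = "B" ∧ p.2 = "A" then d.modify "alternating_BA" 0 (· + 1)
        else d)
      ⟨[("consecutive_A", a), ("consecutive_B", b), ("alternating_AB", ab),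
        ("alternating_BA", ba), ("max_consecutive_same", m), ("total_runs", r)]⟩)
    = ⟨[("consecutive_A", a + (ps.count ("A", "A") : Int)),
        ("consecutive_B", b + (ps.count ("B", "B") : Int)),
        ("alternating_AB", ab + (ps.count ("A", "B") : Int)),
        ("alternating_BA", ba + (ps.count ("B", "A") : Int)),
        ("max_consecutive_same", m), ("total_runs", r)]⟩ := by
  induction ps with
  | nil => intro a b ab ba m r; simp
  | cons p t ih =>
      intro a b ab ba m r
      obtain ⟨x, y⟩ := p
      rw [List.foldl_cons]
      by_cases hAA : x = "A" ∧ y = "A"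
      · obtain ⟨hx, hy⟩ := hAA; subst hx; subst hy
        rw [if_pos (⟨rfl, rfl⟩ : ("A" : String) = "A" ∧ ("A" : String) = "A")]
        rw [show ((⟨[("consecutive_A", a), ("consecutive_B", b), ("alternating_AB", ab),
            ("alternating_BA", ba), ("max_consecutive_same", m), ("total_runs", r)]⟩ :
            PySem.Dict String Int).modify "consecutive_A" 0 (· + 1))
            = ⟨[("consecutive_A", a + 1), ("consecutive_B", b), ("alternating_AB", ab),
               ("alternating_BA", ba), ("max_consecutive_same", m), ("total_runs", r)]⟩ from rfl]
        rw [ih]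
        simp only [List.count_cons, beq_iff_eq]
        norm_num
        omega
      · by_cases hBB : x = "B" ∧ y = "B"
        · obtain ⟨hx, hy⟩ := hBB; subst hx; subst hy
          rw [if_neg (by decide), if_pos (⟨rfl, rfl⟩ : ("B" : String) = "B" ∧ ("B" : String) = "B")]
          rw [show ((⟨[("consecutive_A", a), ("consecutive_B", b), ("alternating_AB", ab),
              ("alternating_BA", ba), ("max_consecutive_same", m), ("total_runs", r)]⟩ :
              PySem.Dict String Int).modify "consecutive_B" 0 (· + 1))
              = ⟨[("consecutive_A", a), ("consecutive_B", b + 1), ("alternating_AB", ab),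
                 ("alternating_BA", ba), ("max_consecutive_same", m), ("total_runs", r)]⟩ from rfl]
          rw [ih]
          simp only [List.count_cons, beq_iff_eq]
          norm_num
          omega
        · by_cases hAB : x = "A" ∧ y = "B"
          · obtain ⟨hx, hy⟩ := hAB; subst hx; subst hy
            rw [if_neg (by decide), if_neg (by decide),
              if_pos (⟨rfl, rfl⟩ : ("A" : String) = "A" ∧ ("B" : String) = "B")]
            rw [show ((⟨[("consecutive_A", a), ("consecutive_B", b), ("alternating_AB", ab),
                ("alternating_BA", ba), ("max_consecutive_same", m), ("total_runs", r)]⟩ :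
                PySem.Dict String Int).modify "alternating_AB" 0 (· + 1))
                = ⟨[("consecutive_A", a), ("consecutive_B", b), ("alternating_AB", ab + 1),
                   ("alternating_BA", ba), ("max_consecutive_same", m), ("total_runs", r)]⟩ from rfl]
            rw [ih]
            simp only [List.count_cons, beq_iff_eq]
            norm_num
            omega
          · by_cases hBA : x = "B" ∧ y = "A"
            · obtain ⟨hx, hy⟩ := hBA; subst hx; subst hy
              rw [if_neg (by decide), if_neg (by decide), if_neg (by decide),
                if_pos (⟨rfl, rfl⟩ : ("B" : String) = "B" ∧ ("A" : String) = "A")]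
              rw [show ((⟨[("consecutive_A", a), ("consecutive_B", b), ("alternating_AB", ab),
                  ("alternating_BA", ba), ("max_consecutive_same", m), ("total_runs", r)]⟩ :
                  PySem.Dict String Int).modify "alternating_BA" 0 (· + 1))
                  = ⟨[("consecutive_A", a), ("consecutive_B", b), ("alternating_AB", ab),
                     ("alternating_BA", ba + 1), ("max_consecutive_same", m), ("total_runs", r)]⟩ from rfl]
              rw [ih]
              simp only [List.count_cons, beq_iff_eq]
              norm_num
              omega
            · rw [if_neg hAA, if_neg hBB, if_neg hAB, if_neg hBA, ih]
              simp only [List.count_cons, beq_iff_eq, Prod.mk.injEq]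
              rw [if_neg hAA, if_neg hBB, if_neg hAB, if_neg hBA]
              norm_num

-- A's first loop computes (max over run lengths, number of runs)
theorem pvRunLemma (xs : List String) : ∀ (c : String) (n mx runs : Int), 1 ≤ n → n ≤ mx →
    (((c :: xs).zip xs).foldl
      (fun (st : Int × Int × Int) p =>
        if p.2 = p.1 then (st.1 + 1, max st.2.1 (st.1 + 1), st.2.2)
        else (1, st.2.1, st.2.2 + 1)) (n, mx, runs)).2
    = (max mx (pvMx (pvRunGo c n xs)), runs + ((pvRunGo c n xs).length : Int) - 1) := by
  induction xs with
  | nil =>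
      intro c n mx runs h1 h2
      simp only [List.zip_nil_right, List.foldl_nil, pvRunGo, pvMx_cons, List.foldl_nil,
        List.length_cons, List.length_nil]
      rw [max_eq_left h2]
      norm_num
  | cons y ys ih =>
      intro c n mx runs h1 h2
      rw [List.zip_cons_cons, List.foldl_cons]
      by_cases h : y = c
      · rw [if_pos h]
        subst h
        have := ih y (n + 1) (max mx (n + 1)) runs (by omega) (le_max_right _ _)
        rw [this]
        rw [show pvRunGo y n (y :: ys) = pvRunGo y (n + 1) ys from by simp [pvRunGo]]
        have hM := pvRunGo_max_ge ys y (n + 1)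
        rw [max_assoc, max_eq_right hM]
      · rw [if_neg h]
        have := ih y 1 mx (runs + 1) (by omega) (by omega)
        rw [this]
        rw [show pvRunGo c n (y :: ys) = n :: pvRunGo y 1 ys from by simp [pvRunGo, h]]
        obtain ⟨h0, t0, hl⟩ := List.exists_cons_of_ne_nil (pvRunGo_ne_nil ys y 1)
        rw [hl, Prod.mk.injEq]
        constructor
        · rw [pvMx_cons, pvMx_cons, List.foldl_cons, pvFoldl_max_pull, pvFoldl_max_pull,
            ← max_assoc, max_eq_left h2]
        · simp only [List.length_cons]
          push_cast
          ring

-- within-run pairs: the (t,t) adjacent-pair count equals the sum of (length-1) over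
-- t-valued runs, minus the part of the first run already consumed before xs starts
theorem pvSame (xs : List String) : ∀ (c : String) (n : Int) (t : String),
    ((((c :: xs).zip xs).count (t, t) : Int))
      = (((pvRLEGo c n xs).filter (fun p => p.1 == t)).map (fun p => p.2 - 1)).sum
        - (if c = t then n - 1 else 0) := by
  induction xs with
  | nil =>
      intro c n t
      by_cases h : c = t <;> simp [pvRLEGo, List.filter, h]
  | cons y ys ih =>
      intro c n t
      rw [List.zip_cons_cons, List.count_cons]
      by_cases h : y = c
      · subst h
        rw [show pvRLEGo y n (y :: ys) = pvRLEGo y (n + 1) ys from by simp [pvRLEGo]]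
        have key := ih y (n + 1) t
        by_cases ht : y = t
        · subst ht
          rw [if_pos (by simp : ((y, y) == (y, y)) = true)]
          push_cast
          rw [key, if_pos rfl, if_pos rfl]
          ring
        · have hpair : ¬ (((y, y) == (t, t)) = true) := by
            simp only [beq_iff_eq, Prod.mk.injEq, not_and]
            intro h1 _; exact ht h1
          rw [if_neg hpair, Nat.add_zero, key, if_neg ht, if_neg ht]
      · have hpair : ¬ (((c, y) == (t, t)) = true) := by
          simp only [beq_iff_eq, Prod.mk.injEq, not_and]
          intro hct hyt; exact h (hyt.trans hct.symm)
        rw [if_neg hpair, Nat.add_zero]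
        rw [show pvRLEGo c n (y :: ys) = (c, n) :: pvRLEGo y 1 ys from by simp [pvRLEGo, h]]
        have key := ih y 1 t
        have key0 : (((y :: ys).zip ys).count (t, t) : Int)
            = (((pvRLEGo y 1 ys).filter (fun p => p.1 == t)).map (fun p => p.2 - 1)).sum := by
          rw [key]; split_ifs <;> ring
        rw [key0]
        by_cases hc : c = t
        · subst hc
          rw [if_pos rfl]
          simp only [List.filter_cons, beq_self_eq_true, if_true, List.map_cons, List.sum_cons]
          ring
        · rw [if_neg hc]
          have hfc : (((c, n) : String × Int).1 == t) = false := by simpa using hc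
          simp only [List.filter_cons, hfc, Bool.false_eq_true, if_false, sub_zero]

-- cross-run pairs: for t ≠ u the (t,u) adjacent-pair count equals the count of (t,u)
-- among the run-boundary value pairs
theorem pvAlt (xs : List String) : ∀ (c : String) (n : Int) (t u : String), t ≠ u →
    ((c :: xs).zip xs).count (t, u)
      = (((pvRLEGo c n xs).zip (pvRLEGo c n xs).tail).map (fun p => (p.1.1, p.2.1))).count (t, u) := by
  induction xs with
  | nil => intro c n t u htu; simp [pvRLEGo]
  | cons y ys ih =>
      intro c n t u htu
      rw [List.zip_cons_cons, List.count_cons]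
      by_cases h : y = c
      · subst h
        have hpair : ¬ (((y, y) == (t, u)) = true) := by
          simp only [beq_iff_eq, Prod.mk.injEq, not_and]
          intro h1 h2; exact htu (h1.symm.trans h2)
        rw [if_neg hpair, Nat.add_zero]
        rw [show pvRLEGo y n (y :: ys) = pvRLEGo y (n + 1) ys from by simp [pvRLEGo]]
        exact ih y (n + 1) t u htu
      · rw [show pvRLEGo c n (y :: ys) = (c, n) :: pvRLEGo y 1 ys from by simp [pvRLEGo, h]]
        obtain ⟨m, rest, hr⟩ := pvRLEGo_head ys y 1
        rw [hr]
        simp only [List.zip_cons_cons, List.tail_cons, List.map_cons, List.count_cons]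
        have key := ih y 1 t u htu
        rw [hr] at key
        simp only [List.tail_cons] at key
        rw [key]

-- ===== VERDICT (by name: the statement is the Claim_ definition above) =====
theorem analyze_sequential_patterns_py_spec : Claim_equal_analyze_sequential_patterns_py := by
  intro rs _
  show analyze_sequential_patterns_py rs = analyze_sequential_patterns_py_alt rs
  cases rs with
  | nil => rfl
  | cons x xs =>
      have hne : (x :: xs : List String) ≠ [] := by simp
      unfold analyze_sequential_patterns_py analyze_sequential_patterns_py_alt
      rw [if_neg hne, if_neg hne]
      dsimp only
      rw [pvLoop1Conv (x :: xs) hne, pvLoop2Conv (x :: xs) hne]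
      rw [show ∀ (v w : Int), (((⟨[("consecutive_A", 0), ("consecutive_B", 0), ("alternating_AB", 0),
          ("alternating_BA", 0), ("max_consecutive_same", 0), ("total_runs", 0)]⟩ :
          PySem.Dict String Int).insert "max_consecutive_same" v).insert "total_runs" w)
          = ⟨[("consecutive_A", 0), ("consecutive_B", 0), ("alternating_AB", 0),
             ("alternating_BA", 0), ("max_consecutive_same", v), ("total_runs", w)]⟩ from
          fun v w => rfl]
      rw [pvLoop2_items]
      rw [PySem.List.slice_from_one, pvRuns_eq x xs]
      have hrun := pvRunLemma xs x 1 1 1 (by omega) (by omega)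
      rw [List.tail_cons]
      rw [show (((x :: xs).zip xs).foldl
        (fun (st : Int × Int × Int) p =>
          if p.2 = p.1 then (st.1 + 1, max st.2.1 (st.1 + 1), st.2.2)
          else (1, st.2.1, st.2.2 + 1)) (1, 1, 1)).2.1
        = max 1 (pvMx (pvRunGo x 1 xs)) from by rw [hrun]]
      rw [show (((x :: xs).zip xs).foldl
        (fun (st : Int × Int × Int) p =>
          if p.2 = p.1 then (st.1 + 1, max st.2.1 (st.1 + 1), st.2.2)
          else (1, st.2.1, st.2.2 + 1)) (1, 1, 1)).2.2
        = 1 + ((pvRunGo x 1 xs).length : Int) - 1 from by rw [hrun]]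
      rw [max_eq_right (le_trans (by omega) (pvRunGo_max_ge xs x 1))]
      have hsameA := pvSame xs x 1 "A"
      have hsameB := pvSame xs x 1 "B"
      have haltAB := pvAlt xs x 1 "A" "B" (by decide)
      have haltBA := pvAlt xs x 1 "B" "A" (by decide)
      simp only [PySem.List.count_eq]
      rw [← haltAB, ← haltBA]
      have hlen : ((pvRLEGo x 1 xs).length : Int) = 1 + ((pvRunGo x 1 xs).length : Int) - 1 := by
        rw [← pvRLEGo_snd xs x 1, List.length_map]
        ring
      have hmx : (match PySem.List.max? ((pvRLEGo x 1 xs).map (fun p => p.2)) id with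
          | some m => m | none => 0) = pvMx (pvRunGo x 1 xs) := by
        rw [pvRLEGo_snd xs x 1]; rfl
      rw [hmx, ← hlen]
      have eA : (0 : Int) + (((x :: xs).zip xs).count ("A", "A") : Int)
          = (((pvRLEGo x 1 xs).filter (fun p => p.1 == "A")).map (fun p => p.2 - 1)).sum := by
        rw [hsameA]
        by_cases hx : x = "A" <;> simp [hx]
      have eB : (0 : Int) + (((x :: xs).zip xs).count ("B", "B") : Int)
          = (((pvRLEGo x 1 xs).filter (fun p => p.1 == "B")).map (fun p => p.2 - 1)).sum := by
        rw [hsameB]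
        by_cases hx : x = "B" <;> simp [hx]
      rw [eA, eB]
      norm_num
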